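-- pv_equiv track=rewrite | github.com/josephlane/Python-Algorithms-Data-Structures | topcoder/CarrotBoxesEasy.py | theIndex
-- ===== SOURCE A (Python) =====
-- def theIndex(carrots, K):
-- 	carrots = list(carrots)
-- 	index = 0
-- 	while K > 0:
-- 		index = carrots.index(max(carrots))
-- 		carrots[index] -= 1
-- 		K -= 1
-- 	return index
-- ===== SOURCE B (Python) =====
-- def theIndex(carrots, K):
--     # Level-based O(n log K): binary-search the level m at which the K-th
--     # decrement happens, then pick the r-th element >= m in index order.
--     if K <= 0:
--         return 0
--     def above(m):
--         # total decrements needed to bring every element down to level m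
--         return sum(c - m for c in carrots if c > m)
--     hi = max(carrots)          # above(hi) == 0 < K
--     lo = hi - K                # above(lo) >= K (the max alone contributes K)
--     while lo + 1 < hi:
--         mid = (lo + hi) // 2
--         if above(mid) < K:
--             hi = mid
--         else:
--             lo = mid
--     m = hi                     # smallest level with above(m) < K
--     r = K - above(m)           # 1-based rank of the K-th op inside level m
--     for i, c in enumerate(carrots):
--         if c >= m:
--             r -= 1
--             if r == 0:
--                 return i
-- ===== Notes on version B (the rewrite author's own statement) =====
-- stated objective: faster
-- what changed: Instead of simulating all K max-find-and-decrement steps, B binary-searches the 'level' at which the K-th decrement happens (using the closed-form count of decrements needed to flatten the list to a level) and then picks the answer with a single scan.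
import Mathlib
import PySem

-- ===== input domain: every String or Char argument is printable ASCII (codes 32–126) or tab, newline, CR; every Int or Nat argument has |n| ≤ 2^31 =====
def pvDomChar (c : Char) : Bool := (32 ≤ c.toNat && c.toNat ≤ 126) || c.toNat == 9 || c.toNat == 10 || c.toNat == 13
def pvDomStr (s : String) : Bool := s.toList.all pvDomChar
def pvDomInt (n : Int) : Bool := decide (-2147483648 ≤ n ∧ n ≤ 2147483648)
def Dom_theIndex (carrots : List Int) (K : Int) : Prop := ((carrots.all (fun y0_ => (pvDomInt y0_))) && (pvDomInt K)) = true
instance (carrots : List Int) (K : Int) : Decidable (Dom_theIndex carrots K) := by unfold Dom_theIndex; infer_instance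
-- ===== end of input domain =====

-- B replaces A's step-by-step simulation (one max-scan and one decrement per
-- operation) by a binary search on the final "level" plus one scan — an
-- asymptotically faster exact re-implementation.

-- ===== PORT A =====
-- while K > 0: index = carrots.index(max(carrots)); carrots[index] -= 1; K -= 1
-- (fuel = number of remaining iterations = K.toNat; the `none` branches are the
-- ValueError of max([]) on an empty list, excluded by Pre_)
def theIndexGo (carrots : List Int) (index : Int) : Nat → Int
  | 0 => index
  | f + 1 =>
    match PySem.List.max? carrots (fun x => x) with
    | none => index   -- max([]) raises: unreachable under Pre_
    | some mx =>
      match PySem.List.index? carrots mx with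
      | none => index -- unreachable: mx ∈ carrots
      | some i =>
        let index' : Int := (i : Int)
        theIndexGo (PySem.List.pySetD carrots index'
          (PySem.List.pyGetD carrots index' 0 - 1)) index' f

def theIndex (carrots : List Int) (K : Int) : Int :=
  theIndexGo carrots 0 K.toNat

-- ===== PORT B =====
-- sum(c - m for c in carrots if c > m)
def pvAbove (carrots : List Int) (m : Int) : Int :=
  ((carrots.filter (fun c => m < c)).map (fun c => c - m)).sum

-- while lo + 1 < hi: mid = (lo + hi) // 2; if above(mid) < K: hi = mid else lo = mid
def pvBsearch (carrots : List Int) (K lo hi : Int) : Int :=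
  if _h : lo + 1 < hi then
    let mid := PySem.Int.floordiv (lo + hi) 2
    if pvAbove carrots mid < K then pvBsearch carrots K lo mid
    else pvBsearch carrots K mid hi
  else hi
termination_by (hi - lo).toNat
decreasing_by
  all_goals
    simp only [mid, PySem.Int.floordiv_eq_ediv_of_pos (by norm_num : (0:Int) < 2)] at *
    omega

-- for i, c in enumerate(carrots): if c >= m: r -= 1; if r == 0: return i
-- (the [] branch is Python's fall-through `return None`, unreachable under Pre_)
def pvScanPick (m : Int) : Int → Int → List Int → Int
  | _, _, [] => 0
  | r, i, c :: rest =>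
    if m ≤ c then
      (if r - 1 = 0 then i else pvScanPick m (r - 1) (i + 1) rest)
    else pvScanPick m r (i + 1) rest

def theIndex_alt (carrots : List Int) (K : Int) : Int :=
  if K ≤ 0 then 0
  else
    match PySem.List.max? carrots (fun x => x) with
    | none => 0   -- max([]) raises: unreachable under Pre_
    | some hi =>
      let lo := hi - K
      let m := pvBsearch carrots K lo hi
      let r := K - pvAbove carrots m
      pvScanPick m r 0 carrots

-- ===== PRECONDITION & SPEC =====
-- Pre_ excludes only the inputs where A raises: carrots = [] with K > 0
-- (max([]) is a ValueError); there B falls off its loop as well.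
def Pre_theIndex (carrots : List Int) (K : Int) : Prop := K ≤ 0 ∨ carrots ≠ []
instance (carrots : List Int) (K : Int) : Decidable (Pre_theIndex carrots K) := by
  unfold Pre_theIndex; infer_instance

def pvWitness_theIndex : List Int × Int := ([3, 1, 2], 2)

def Spec_theIndex (carrots : List Int) (K : Int) (out : Int) : Prop := out = theIndex_alt carrots K
instance (carrots : List Int) (K : Int) (out : Int) : Decidable (Spec_theIndex carrots K out) := by
  unfold Spec_theIndex; infer_instance

-- ===== CLAIM (what is proved, stated in full; the proofs are below) =====
def Claim_equal_theIndex : Prop := ∀ (carrots : List Int) (K : Int), Dom_theIndex carrots K → Pre_theIndex carrots K → Spec_theIndex carrots K (theIndex carrots K)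

-- ===== LEMMAS AND PROOFS =====

theorem pvAbove_cons (x : Int) (t : List Int) (m : Int) :
    pvAbove (x :: t) m = (if m < x then x - m else 0) + pvAbove t m := by
  by_cases h : m < x <;> simp [pvAbove, List.filter_cons, h]

theorem pvAbove_nonneg (xs : List Int) (m : Int) : 0 ≤ pvAbove xs m := by
  induction xs with
  | nil => simp [pvAbove]
  | cons x t ih => rw [pvAbove_cons]; split_ifs with h <;> omega

theorem pvAbove_eq_zero (xs : List Int) (m : Int) (h : ∀ x ∈ xs, x ≤ m) : pvAbove xs m = 0 := by
  induction xs with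
  | nil => simp [pvAbove]
  | cons x t ih =>
    rw [pvAbove_cons]
    have hx := h x (by simp)
    have := ih (fun y hy => h y (by simp [hy]))
    split_ifs with h' <;> omega

theorem exists_gt_of_pvAbove_pos (xs : List Int) (m : Int) (h : 0 < pvAbove xs m) :
    ∃ x ∈ xs, m < x := by
  by_contra hc
  push_neg at hc
  have := pvAbove_eq_zero xs m (fun x hx => hc x hx)
  omega

theorem sub_le_pvAbove_of_mem (xs : List Int) (m x : Int) (hx : x ∈ xs) :
    x - m ≤ pvAbove xs m := by
  induction xs with
  | nil => simp at hx
  | cons y t ih =>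
    rw [pvAbove_cons]
    rcases List.mem_cons.mp hx with h | h
    · subst h
      have := pvAbove_nonneg t m
      split_ifs with h' <;> omega
    · have := ih h
      split_ifs with h' <;> omega

theorem pvAbove_set (xs : List Int) (m M : Int) :
    ∀ (i0 : Nat) (h : i0 < xs.length), xs[i0] = M → m ≤ M - 1 →
    pvAbove (xs.set i0 (M - 1)) m = pvAbove xs m - 1 := by
  induction xs with
  | nil => intro i0 h; simp at h
  | cons x t ih =>
    intro i0 h hM hm
    match i0 with
    | 0 =>
      simp only [List.getElem_cons_zero] at hM
      subst hM
      simp only [List.set_cons_zero]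
      rw [pvAbove_cons, pvAbove_cons]
      split_ifs with h1 h2 <;> omega
    | j + 1 =>
      simp only [List.getElem_cons_succ] at hM
      simp only [List.set_cons_succ]
      rw [pvAbove_cons, pvAbove_cons,
        ih j (by simpa using h) hM hm]
      split_ifs with h1 <;> omega

theorem pvScanPick_first (m : Int) :
    ∀ (xs : List Int) (i0 : Nat) (i : Int) (h : i0 < xs.length),
      m ≤ xs[i0] → (∀ (j : Nat) (hj : j < xs.length), j < i0 → ¬ m ≤ xs[j]) →
      pvScanPick m 1 i xs = i + i0 := by
  intro xs
  induction xs with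
  | nil => intro i0 i h; simp at h
  | cons x t ih =>
    intro i0 i h hge hfirst
    match i0 with
    | 0 =>
      simp only [List.getElem_cons_zero] at hge
      simp [pvScanPick, hge]
    | j + 1 =>
      have hx : ¬ m ≤ x := hfirst 0 (by simp) (by omega)
      simp only [List.getElem_cons_succ] at hge
      simp only [pvScanPick, if_neg hx]
      rw [ih j (i + 1) (by simpa using h) hge
        (fun k hk hkj => hfirst (k + 1) (by simpa using hk) (by omega))]
      push_cast; ring

theorem pvScanPick_congr_set (m : Int) :
    ∀ (xs : List Int) (i0 : Nat) (r i v : Int) (h : i0 < xs.length),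
      (m ≤ v ↔ m ≤ xs[i0]) →
      pvScanPick m r i (xs.set i0 v) = pvScanPick m r i xs := by
  intro xs
  induction xs with
  | nil => intro i0 r i v h; simp at h
  | cons x t ih =>
    intro i0 r i v h hiff
    match i0 with
    | 0 =>
      simp only [List.getElem_cons_zero] at hiff
      simp only [List.set_cons_zero, pvScanPick]
      exact if_congr hiff rfl rfl
    | j + 1 =>
      simp only [List.getElem_cons_succ] at hiff
      simp only [List.set_cons_succ]
      by_cases hx : m ≤ x
      · simp only [pvScanPick, if_pos hx]
        split_ifs with h1
        · rfl
        · exact ih j _ _ _ (by simpa using h) hiff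
      · simp only [pvScanPick, if_neg hx]
        exact ih j _ _ _ (by simpa using h) hiff

theorem pvScanPick_shift (M : Int) :
    ∀ (xs : List Int) (i0 : Nat) (r i : Int) (h : i0 < xs.length),
      xs[i0] = M → (∀ (j : Nat) (hj : j < xs.length), j < i0 → xs[j] < M) → 1 ≤ r →
      pvScanPick M r i (xs.set i0 (M - 1)) = pvScanPick M (r + 1) i xs := by
  intro xs
  induction xs with
  | nil => intro i0 r i h; simp at h
  | cons x t ih =>
    intro i0 r i h hM hfirst hr
    match i0 with
    | 0 =>
      simp only [List.getElem_cons_zero] at hM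
      simp only [List.set_cons_zero]
      have h1 : ¬ M ≤ M - 1 := by omega
      have h2 : ¬ r + 1 - 1 = 0 := by omega
      simp [pvScanPick, hM, h1]
      exact fun h0 => absurd h0 (by omega)
    | j + 1 =>
      simp only [List.getElem_cons_succ] at hM
      have hx0 : x < M := by simpa using hfirst 0 (by simp) (by omega)
      have hx : ¬ M ≤ x := by omega
      simp only [List.set_cons_succ, pvScanPick, if_neg hx]
      exact ih j r (i + 1) (by simpa using h) hM
        (fun k hk hkj => by
          have := hfirst (k + 1) (by simpa using hk) (by omega)
          simpa using this) hr

-- One step of A's loop: the list is nonempty, so max? and index? succeed, the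
-- chosen index is the first index holding the maximum, and that element drops by 1.
theorem go_eq (f : Nat) :
    ∀ (xs : List Int) (idx m : Int), xs ≠ [] → 1 ≤ f →
      pvAbove xs m < (f : Int) → (f : Int) ≤ pvAbove xs (m - 1) →
      theIndexGo xs idx f = pvScanPick m ((f : Int) - pvAbove xs m) 0 xs := by
  induction f with
  | zero => intro xs idx m _ hf; omega
  | succ f ih =>
    intro xs idx m hne _ hlt hge
    -- the max and its first index
    obtain ⟨M, hmx⟩ : ∃ M, PySem.List.max? xs (fun x => x) = some M := by
      cases hmx : PySem.List.max? xs (fun x => x) with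
      | none => exact absurd ((PySem.List.max?_eq_none_iff xs _).mp hmx) hne
      | some M => exact ⟨M, rfl⟩
    have hMmem : M ∈ xs := PySem.List.max?_mem hmx
    have hMmax : ∀ y ∈ xs, y ≤ M := PySem.List.max?_isMax hmx
    obtain ⟨i0, hidx⟩ : ∃ i0, PySem.List.index? xs M = some i0 := by
      have := (PySem.List.index?_isSome_iff xs M).mpr hMmem
      exact Option.isSome_iff_exists.mp this
    obtain ⟨hlen, hget, hfirstne⟩ := PySem.List.getElem_of_index?_eq_some hidx
    have hfirst : ∀ (j : Nat) (hj : j < xs.length), j < i0 → xs[j] < M := by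
      intro j hj hji
      have h1 := hfirstne j hji
      have h2 := hMmax xs[j] (List.getElem_mem hj)
      omega
    -- the decremented list
    have hidx' : List.idxOf? M xs = some i0 := by
      rw [← PySem.List.index?_eq_idxOf?]; exact hidx
    have hgetD : xs[(i0 : Nat)]?.getD 0 = M := by
      rw [List.getElem?_eq_getElem hlen, Option.getD_some, hget]
    have hstep0 : theIndexGo xs idx (f + 1)
        = theIndexGo (xs.set i0 (M - 1)) (i0 : Int) f := by
      simp [theIndexGo, hmx, hidx', hgetD, PySem.List.pySetD_natCast,
        PySem.List.pyGetD_natCast]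
    have hmle : m ≤ M := by
      have hpos : 0 < pvAbove xs (m - 1) := by push_cast at hge; omega
      obtain ⟨x, hxmem, hxgt⟩ := exists_gt_of_pvAbove_pos xs (m - 1) hpos
      have := hMmax x hxmem
      omega
    match f, ih with
    | 0, _ =>
      -- K = 1: the answer is the first index of the max, and m is forced to be M
      have h0 : pvAbove xs m = 0 := by
        have := pvAbove_nonneg xs m
        push_cast at hlt; omega
      have hall : ∀ x ∈ xs, x ≤ m := by
        intro x hx
        by_contra hc
        have := sub_le_pvAbove_of_mem xs m x hx
        omega
      have hmM : m = M := le_antisymm hmle (hall M hMmem)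
      rw [hstep0, h0]
      simp only [theIndexGo]
      rw [show ((0 + 1 : Nat) : Int) - 0 = 1 by norm_num]
      rw [pvScanPick_first m xs i0 0 hlen (by omega)
        (fun j hj hji => by have := hfirst j hj hji; omega)]
      omega
    | f' + 1, ih =>
      have hne' : xs.set i0 (M - 1) ≠ [] := by
        intro hc
        have hlen0 : (xs.set i0 (M - 1)).length = 0 := by rw [hc]; rfl
        rw [List.length_set] at hlen0
        omega
      by_cases hcase : m = M
      · -- still inside the top level: rank shifts by one
        subst hcase
        have h0 : pvAbove xs m = 0 := pvAbove_eq_zero xs m hMmax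
        have h0' : pvAbove (xs.set i0 (m - 1)) m = 0 := by
          refine pvAbove_eq_zero _ m ?_
          intro x hx
          rcases List.mem_or_eq_of_mem_set hx with h | h
          · exact hMmax x h
          · omega
        have hstep1 : pvAbove (xs.set i0 (m - 1)) (m - 1) = pvAbove xs (m - 1) - 1 :=
          pvAbove_set xs (m - 1) m i0 hlen hget (by omega)
        rw [hstep0, ih (xs.set i0 (m - 1)) (i0 : Int) m hne' (by omega)
          (by push_cast at hlt ⊢; omega) (by push_cast at hge ⊢; omega)]
        rw [h0', h0]
        have hshift := pvScanPick_shift m xs i0 ((f' + 1 : Nat) : Int) 0 hlen hget hfirst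
          (by push_cast; omega)
        rw [show ((f' + 1 : Nat) : Int) - 0 = ((f' + 1 : Nat) : Int) by ring, hshift]
        congr 1 <;> omega
      · -- strictly below the top level: the index set at level m is unchanged
        have hmlt : m ≤ M - 1 := by omega
        have hstep1 : pvAbove (xs.set i0 (M - 1)) m = pvAbove xs m - 1 :=
          pvAbove_set xs m M i0 hlen hget hmlt
        have hstep2 : pvAbove (xs.set i0 (M - 1)) (m - 1) = pvAbove xs (m - 1) - 1 :=
          pvAbove_set xs (m - 1) M i0 hlen hget (by omega)
        rw [hstep0, ih (xs.set i0 (M - 1)) (i0 : Int) m hne' (by omega)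
          (by push_cast at hlt ⊢; omega) (by push_cast at hge ⊢; omega)]
        rw [pvScanPick_congr_set m xs i0 _ _ _ hlen (by rw [hget]; constructor <;> intro <;> omega)]
        congr 1
        rw [hstep1]
        push_cast; ring

theorem pvBsearch_spec (xs : List Int) (K : Int) :
    ∀ (n : Nat) (lo hi : Int), (hi - lo).toNat ≤ n → lo < hi →
      K ≤ pvAbove xs lo → pvAbove xs hi < K →
      pvAbove xs (pvBsearch xs K lo hi) < K ∧ K ≤ pvAbove xs (pvBsearch xs K lo hi - 1) := by
  intro n
  induction n with
  | zero => intro lo hi hn hlt; omega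
  | succ n ih =>
    intro lo hi hn hlt hlo hhi
    rw [pvBsearch]
    by_cases h : lo + 1 < hi
    · rw [dif_pos h]
      have hmid : lo < PySem.Int.floordiv (lo + hi) 2 ∧ PySem.Int.floordiv (lo + hi) 2 < hi := by
        rw [PySem.Int.floordiv_eq_ediv_of_pos (by norm_num : (0:Int) < 2)]
        omega
      by_cases hc : pvAbove xs (PySem.Int.floordiv (lo + hi) 2) < K
      · simp only [if_pos hc]
        exact ih lo _ (by omega) hmid.1 hlo hc
      · simp only [if_neg hc]
        exact ih _ hi (by omega) hmid.2 (by omega) hhi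
    · rw [dif_neg h]
      have : hi - 1 = lo := by omega
      rw [this]
      exact ⟨hhi, hlo⟩

-- ===== VERDICT (by name: the statement is the Claim_ definition above) =====
theorem theIndex_spec : Claim_equal_theIndex := by
  intro xs K _ hpre
  unfold Spec_theIndex
  by_cases hK : K ≤ 0
  · simp [theIndex, theIndex_alt, hK, Int.toNat_of_nonpos hK, theIndexGo]
  · have hne : xs ≠ [] := hpre.resolve_left hK
    obtain ⟨M, hmx⟩ : ∃ M, PySem.List.max? xs (fun x => x) = some M := by
      cases hmx : PySem.List.max? xs (fun x => x) with
      | none => exact absurd ((PySem.List.max?_eq_none_iff xs _).mp hmx) hne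
      | some M => exact ⟨M, rfl⟩
    have hMmem : M ∈ xs := PySem.List.max?_mem hmx
    have hMmax : ∀ y ∈ xs, y ≤ M := PySem.List.max?_isMax hmx
    have hlo : K ≤ pvAbove xs (M - K) := by
      have := sub_le_pvAbove_of_mem xs (M - K) M hMmem
      omega
    have hhi : pvAbove xs M < K := by
      rw [pvAbove_eq_zero xs M hMmax]; omega
    obtain ⟨hc1, hc2⟩ := pvBsearch_spec xs K (M - (M - K)).toNat (M - K) M le_rfl
      (by omega) hlo hhi
    unfold theIndex theIndex_alt
    rw [if_neg hK, hmx]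
    have hKcast : ((K.toNat : Nat) : Int) = K := Int.toNat_of_nonneg (by omega)
    rw [go_eq K.toNat xs 0 (pvBsearch xs K (M - K) M) hne (by omega)
      (by rw [hKcast]; exact hc1) (by rw [hKcast]; exact hc2)]
    rw [hKcast]
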